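-- pv_equiv track=rewrite | github.com/kusumatadala/NQUEENS | NQueensUsingHillClimbingApproach.py | bestneighbour
-- ===== SOURCE A (Python) =====
-- def heuristic(board):
--     """
--
--
--     Parameters
--     ----------
--     board :  Integer Array
--          board[i]=number of the row in which the queen is placed in i th column.
--
--     Returns
--     -------
--     d : Integer
--         Number of queens attacking each other.
--
--     """
--     d=0
--     n=len(board)
--     for k in range(n):
--         i,j=k,board[k]
--         for l in range(k+1,n):
--             p,q=l,board[l]
--             if(q==j or (i+j)==(p+q) or (j-i)==(q-p)):
--                 d+=1
--     return d
--
-- def bestneighbour(board,cost):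
--     """
--
--
--     Parameters
--     ----------
--     board : Integer array
--              board[i]=number of the row in which the queen is placed in i th column.
--     cost : Integer
--            Number of queens attacking each other.
--
--     Returns
--     -------
--     ans : Integer array or None
--         an arrangement generated after displacing a single queen
--         from the board in the same in the same column only with minimum heuristic
--         if the minimum heuristic is grater than board returns None.
--
--     """
--     mini=cost
--     ans=None
--     n=len(board)
--     for i in range(n):
--         temp=board[i]
--         for j in range(n):
--             board[i]=j
--             cost=heuristic(board)
--             if(cost<mini):
--                 ans=board.copy()
--         board[i]=temp
--     return ans
-- ===== SOURCE B (Python) =====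
-- def conflict_stats(board):
--     # One pass: number of conflicting pairs, plus hash counters of the three
--     # conflict classes (row, diagonal i+r, anti-diagonal r-i).
--     rows, diags, antis = {}, {}, {}
--     h = 0
--     for i, r in enumerate(board):
--         h += rows.get(r, 0) + diags.get(i + r, 0) + antis.get(r - i, 0)
--         rows[r] = rows.get(r, 0) + 1
--         diags[i + r] = diags.get(i + r, 0) + 1
--         antis[r - i] = antis.get(r - i, 0) + 1
--     return rows, diags, antis, h
--
-- def bestneighbour(board, cost):
--     rows, diags, antis, h = conflict_stats(board)
--     n = len(board)
--     ans = None
--     for i in range(n):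
--         r0 = board[i]
--         base = h - (rows.get(r0, 0) - 1) - (diags.get(i + r0, 0) - 1) - (antis.get(r0 - i, 0) - 1)
--         for j in range(n):
--             gj = rows.get(j, 0) + diags.get(i + j, 0) + antis.get(j - i, 0) - (3 if j == r0 else 0)
--             if base + gj < cost:
--                 ans = board[:i] + [j] + board[i + 1:]
--     return ans
-- ===== Notes on version B (the rewrite author's own statement) =====
-- stated objective: faster
-- what changed: Instead of recomputing the O(n^2) all-pairs conflict count for each of the n^2 neighbours, B builds row/diagonal/anti-diagonal hash counters and the conflict total in one pass and scores each single-queen move by an O(1) counter delta; neighbours are built as fresh slices instead of in-place mutation.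
import Mathlib
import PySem

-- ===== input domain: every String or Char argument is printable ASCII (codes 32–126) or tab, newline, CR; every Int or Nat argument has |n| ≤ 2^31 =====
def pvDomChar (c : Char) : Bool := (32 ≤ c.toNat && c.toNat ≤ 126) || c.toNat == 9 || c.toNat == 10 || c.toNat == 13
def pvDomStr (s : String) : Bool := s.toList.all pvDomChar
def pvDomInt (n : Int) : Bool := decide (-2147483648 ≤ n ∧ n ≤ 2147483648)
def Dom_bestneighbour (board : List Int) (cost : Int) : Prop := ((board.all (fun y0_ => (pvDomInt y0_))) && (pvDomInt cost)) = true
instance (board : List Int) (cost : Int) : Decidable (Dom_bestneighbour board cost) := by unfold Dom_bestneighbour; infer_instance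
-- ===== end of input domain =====

-- B computes row/diagonal/anti-diagonal hash counters and the pair-conflict total in one
-- pass, then scores every single-queen move by an O(1) counter delta instead of A's
-- from-scratch O(n^2) all-pairs heuristic per neighbour (objective: faster).
-- A temporarily mutates `board` in place but restores it before returning; B never
-- mutates it — the equivalence proved here is about the return value.
-- ===== PORT A =====
def heuristic (board : List Int) : Int :=
  let n : Int := board.length
  (PySem.List.pyRange 0 n 1).foldl (fun d k =>
    let i : Int := k
    let j : Int := PySem.List.pyGetD board k 0
    (PySem.List.pyRange (k + 1) n 1).foldl (fun d l =>
      let p : Int := l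
      let q : Int := PySem.List.pyGetD board l 0
      if q == j || (i + j) == (p + q) || (j - i) == (q - p) then d + 1 else d) d) 0

def bestneighbour (board : List Int) (cost : Int) : Option (List Int) :=
  let mini : Int := cost
  let n : Int := board.length
  let st := (PySem.List.pyRange 0 n 1).foldl
    (fun (st : List Int × Option (List Int)) i =>
      let temp := PySem.List.pyGetD st.1 i 0
      let st2 := (PySem.List.pyRange 0 n 1).foldl
        (fun (st : List Int × Option (List Int)) j =>
          let bd := PySem.List.pySetD st.1 i j
          let cost := heuristic bd
          if cost < mini then (bd, some bd) else (bd, st.2))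
        st
      (PySem.List.pySetD st2.1 i temp, st2.2))
    (board, none)
  st.2

-- ===== PORT B =====
def conflictStats (board : List Int) : PySem.Dict Int Int × PySem.Dict Int Int × PySem.Dict Int Int × Int :=
  (PySem.List.enumerate board 0).foldl
    (fun (st : PySem.Dict Int Int × PySem.Dict Int Int × PySem.Dict Int Int × Int) p =>
      let i := p.1
      let r := p.2
      let h := st.2.2.2 + st.1.getD r 0 + st.2.1.getD (i + r) 0 + st.2.2.1.getD (r - i) 0
      (st.1.insert r (st.1.getD r 0 + 1),
       st.2.1.insert (i + r) (st.2.1.getD (i + r) 0 + 1),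
       st.2.2.1.insert (r - i) (st.2.2.1.getD (r - i) 0 + 1),
       h))
    (PySem.Dict.empty, PySem.Dict.empty, PySem.Dict.empty, 0)

def bestneighbour_alt (board : List Int) (cost : Int) : Option (List Int) :=
  let st := conflictStats board
  let rows := st.1
  let diags := st.2.1
  let antis := st.2.2.1
  let h := st.2.2.2
  let n : Int := board.length
  (PySem.List.pyRange 0 n 1).foldl (fun ans i =>
    let r0 := PySem.List.pyGetD board i 0
    let base := h - (rows.getD r0 0 - 1) - (diags.getD (i + r0) 0 - 1) - (antis.getD (r0 - i) 0 - 1)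
    (PySem.List.pyRange 0 n 1).foldl (fun ans j =>
      let gj := rows.getD j 0 + diags.getD (i + j) 0 + antis.getD (j - i) 0 - (if j == r0 then 3 else 0)
      if base + gj < cost then
        some (PySem.List.slice board none (some i) ++ [j] ++ PySem.List.slice board (some (i + 1)) none)
      else ans) ans) none

-- ===== PRECONDITION & SPEC =====
def Spec_bestneighbour (board : List Int) (cost : Int) (out : Option (List Int)) : Prop := out = bestneighbour_alt board cost
instance (board : List Int) (cost : Int) (out : Option (List Int)) : Decidable (Spec_bestneighbour board cost out) := by unfold Spec_bestneighbour; infer_instance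

-- ===== CLAIM (what is proved, stated in full; the proofs are below) =====
def Claim_equal_bestneighbour : Prop := ∀ (board : List Int) (cost : Int), Dom_bestneighbour board cost → Spec_bestneighbour board cost (bestneighbour board cost)

-- ===== LEMMAS AND PROOFS =====
def confCount (j d : Int) : List Int → Int
  | [] => 0
  | q :: t => (if q = j ∨ j = q + d ∨ j = q - d then 1 else 0) + confCount j (d + 1) t

def pairConf : List Int → Int
  | [] => 0
  | x :: xs => confCount x 1 xs + pairConf xs

def backConf (r : Int) : List Int → Int
  | [] => 0
  | q :: t => (if r = q ∨ q = r + ((t.length : Int) + 1) ∨ q = r - ((t.length : Int) + 1) then 1 else 0) + backConf r t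

def cntR (v : Int) : List Int → Int
  | [] => 0
  | q :: t => (if q = v then 1 else 0) + cntR v t

def cntD (w s : Int) : List Int → Int
  | [] => 0
  | q :: t => (if s + q = w then 1 else 0) + cntD w (s + 1) t

def cntA (w s : Int) : List Int → Int
  | [] => 0
  | q :: t => (if q - s = w then 1 else 0) + cntA w (s + 1) t

lemma confCount_append (j : Int) (t : List Int) (x : Int) :
    ∀ d, confCount j d (t ++ [x]) =
      confCount j d t + (if x = j ∨ j = x + (d + (t.length : Int)) ∨ j = x - (d + (t.length : Int)) then 1 else 0) := by
  induction t with
  | nil => intro d; simp [confCount]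
  | cons q t ih =>
      intro d
      simp only [List.cons_append, confCount, ih (d + 1), List.length_cons]
      push_cast
      ring_nf

lemma pairConf_append (xs : List Int) (x : Int) :
    pairConf (xs ++ [x]) = pairConf xs + backConf x xs := by
  induction xs with
  | nil => simp [pairConf, backConf, confCount]
  | cons q t ih =>
      simp only [List.cons_append, pairConf, backConf, ih, confCount_append q t x 1]
      have : (1 : Int) + (t.length : Int) = (t.length : Int) + 1 := by ring
      rw [this]
      ring

lemma threeCounts (xs : List Int) (r : Int) :
    ∀ s : Int, cntR r xs + cntD (s + (xs.length : Int) + r) s xs + cntA (r - (s + (xs.length : Int))) s xs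
      = backConf r xs := by
  induction xs with
  | nil => intro s; simp [cntR, cntD, cntA, backConf]
  | cons q t ih =>
      intro s
      simp only [cntR, cntD, cntA, backConf, List.length_cons]
      have ht := ih (s + 1)
      push_cast at ht ⊢
      have harr : s + ((t.length : Int) + 1) + r = (s + 1) + (t.length : Int) + r := by ring
      have harr2 : r - (s + ((t.length : Int) + 1)) = r - ((s + 1) + (t.length : Int)) := by ring
      rw [harr, harr2]
      rw [← ht]
      split_ifs <;> omega

lemma cntR_append (v : Int) (t : List Int) (x : Int) :
    cntR v (t ++ [x]) = cntR v t + (if x = v then 1 else 0) := by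
  induction t with
  | nil => simp [cntR]
  | cons q t ih => simp only [List.cons_append, cntR, ih]; ring

lemma cntD_append (w : Int) (t : List Int) (x : Int) :
    ∀ s, cntD w s (t ++ [x]) = cntD w s t + (if s + (t.length : Int) + x = w then 1 else 0) := by
  induction t with
  | nil => intro s; simp [cntD]
  | cons q t ih =>
      intro s
      simp only [List.cons_append, cntD, ih (s + 1), List.length_cons]
      push_cast
      ring_nf

lemma cntA_append (w : Int) (t : List Int) (x : Int) :
    ∀ s, cntA w s (t ++ [x]) = cntA w s t + (if x - (s + (t.length : Int)) = w then 1 else 0) := by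
  induction t with
  | nil => intro s; simp [cntA]
  | cons q t ih =>
      intro s
      simp only [List.cons_append, cntA, ih (s + 1), List.length_cons]
      push_cast
      ring_nf

-- the B-side fold invariant

lemma bfold_inv (xs : List Int) :
    (∀ v, ((PySem.List.enumerate xs 0).foldl
      (fun (st : PySem.Dict Int Int × PySem.Dict Int Int × PySem.Dict Int Int × Int) p =>
        (st.1.insert p.2 (st.1.getD p.2 0 + 1),
         st.2.1.insert (p.1 + p.2) (st.2.1.getD (p.1 + p.2) 0 + 1),
         st.2.2.1.insert (p.2 - p.1) (st.2.2.1.getD (p.2 - p.1) 0 + 1),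
         st.2.2.2 + st.1.getD p.2 0 + st.2.1.getD (p.1 + p.2) 0 + st.2.2.1.getD (p.2 - p.1) 0))
      (PySem.Dict.empty, PySem.Dict.empty, PySem.Dict.empty, 0)).1.getD v 0 = cntR v xs)
    ∧ (∀ w, ((PySem.List.enumerate xs 0).foldl
      (fun (st : PySem.Dict Int Int × PySem.Dict Int Int × PySem.Dict Int Int × Int) p =>
        (st.1.insert p.2 (st.1.getD p.2 0 + 1),
         st.2.1.insert (p.1 + p.2) (st.2.1.getD (p.1 + p.2) 0 + 1),
         st.2.2.1.insert (p.2 - p.1) (st.2.2.1.getD (p.2 - p.1) 0 + 1),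
         st.2.2.2 + st.1.getD p.2 0 + st.2.1.getD (p.1 + p.2) 0 + st.2.2.1.getD (p.2 - p.1) 0))
      (PySem.Dict.empty, PySem.Dict.empty, PySem.Dict.empty, 0)).2.1.getD w 0 = cntD w 0 xs)
    ∧ (∀ w, ((PySem.List.enumerate xs 0).foldl
      (fun (st : PySem.Dict Int Int × PySem.Dict Int Int × PySem.Dict Int Int × Int) p =>
        (st.1.insert p.2 (st.1.getD p.2 0 + 1),
         st.2.1.insert (p.1 + p.2) (st.2.1.getD (p.1 + p.2) 0 + 1),
         st.2.2.1.insert (p.2 - p.1) (st.2.2.1.getD (p.2 - p.1) 0 + 1),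
         st.2.2.2 + st.1.getD p.2 0 + st.2.1.getD (p.1 + p.2) 0 + st.2.2.1.getD (p.2 - p.1) 0))
      (PySem.Dict.empty, PySem.Dict.empty, PySem.Dict.empty, 0)).2.2.1.getD w 0 = cntA w 0 xs)
    ∧ ((PySem.List.enumerate xs 0).foldl
      (fun (st : PySem.Dict Int Int × PySem.Dict Int Int × PySem.Dict Int Int × Int) p =>
        (st.1.insert p.2 (st.1.getD p.2 0 + 1),
         st.2.1.insert (p.1 + p.2) (st.2.1.getD (p.1 + p.2) 0 + 1),
         st.2.2.1.insert (p.2 - p.1) (st.2.2.1.getD (p.2 - p.1) 0 + 1),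
         st.2.2.2 + st.1.getD p.2 0 + st.2.1.getD (p.1 + p.2) 0 + st.2.2.1.getD (p.2 - p.1) 0))
      (PySem.Dict.empty, PySem.Dict.empty, PySem.Dict.empty, 0)).2.2.2 = pairConf xs := by
  induction xs using List.reverseRecOn with
  | nil =>
      refine ⟨?_, ?_, ?_, ?_⟩ <;>
        simp [PySem.List.enumerate_nil, cntR, cntD, cntA, pairConf, PySem.Dict.getD_empty]
  | append_singleton xs x ih =>
      obtain ⟨hR, hD, hA, hH⟩ := ih
      rw [PySem.List.enumerate_append] at *
      simp only [PySem.List.enumerate_cons, PySem.List.enumerate_nil, zero_add,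
        List.foldl_append, List.foldl_cons, List.foldl_nil] at *
      refine ⟨?_, ?_, ?_, ?_⟩
      · intro v
        simp only [PySem.Dict.getD_insert, hR, cntR_append]
        split_ifs with h1 h2 h2 <;> first | omega | (subst_vars; omega)
      · intro w
        simp only [PySem.Dict.getD_insert, hD, cntD_append, zero_add]
        split_ifs with h1 h2 h2 <;> first | omega | (subst_vars; omega)
      · intro w
        simp only [PySem.Dict.getD_insert, hA, cntA_append, zero_add]
        split_ifs with h1 h2 h2 <;> first | omega | (subst_vars; omega)
      · have h3 := threeCounts xs x 0
        simp only [zero_add] at h3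
        simp only [hH, hR, hD, hA, pairConf_append, ← h3]
        ring


lemma heuristic_inner (board : List Int) (k j : Int) :
    ∀ (f m : Nat), board.length - m = f → ∀ d : Int,
      (PySem.List.pyRange (m : Int) (board.length : Int) 1).foldl (fun d l =>
        if PySem.List.pyGetD board l 0 == j || (k + j) == (l + PySem.List.pyGetD board l 0)
          || (j - k) == (PySem.List.pyGetD board l 0 - l) then d + 1 else d) d
      = d + confCount j ((m : Int) - k) (board.drop m) := by
  intro f
  induction f with
  | zero =>
      intro m hm d
      have hge : board.length ≤ m := by omega
      rw [List.drop_eq_nil_of_le hge, PySem.List.pyRange_one_eq_nil (by exact_mod_cast hge)]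
      simp [confCount]
  | succ f ih =>
      intro m hm d
      have hlt : m < board.length := by omega
      rw [PySem.List.pyRange_one_cons (by exact_mod_cast hlt), List.foldl_cons,
        List.drop_eq_getElem_cons hlt]
      have hget : PySem.List.pyGetD board (m : Int) 0 = board[m] := by
        simp [PySem.List.pyGetD_natCast, List.getElem?_eq_getElem hlt]
      rw [hget]
      have hstep := ih (m + 1) (by omega)
        (if board[m] == j || (k + j) == ((m : Int) + board[m]) || (j - k) == (board[m] - (m : Int))
          then d + 1 else d)
      push_cast at hstep
      rw [hstep]
      simp only [confCount]
      have harith : (m : Int) - k + 1 = (m : Int) + 1 - k := by ring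
      rw [harith]
      simp only [Bool.or_eq_true, beq_iff_eq]
      split_ifs with h1 h2 <;> omega

lemma heuristic_eq (board : List Int) : heuristic board = pairConf board := by
  have outer : ∀ (f m : Nat), board.length - m = f → ∀ d : Int,
      (PySem.List.pyRange (m : Int) (board.length : Int) 1).foldl (fun d k =>
        (PySem.List.pyRange (k + 1) (board.length : Int) 1).foldl (fun d l =>
          if PySem.List.pyGetD board l 0 == PySem.List.pyGetD board k 0
            || (k + PySem.List.pyGetD board k 0) == (l + PySem.List.pyGetD board l 0)
            || (PySem.List.pyGetD board k 0 - k) == (PySem.List.pyGetD board l 0 - l)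
          then d + 1 else d) d) d
      = d + pairConf (board.drop m) := by
    intro f
    induction f with
    | zero =>
        intro m hm d
        have hge : board.length ≤ m := by omega
        rw [List.drop_eq_nil_of_le hge, PySem.List.pyRange_one_eq_nil (by exact_mod_cast hge)]
        simp [pairConf]
    | succ f ih =>
        intro m hm d
        have hlt : m < board.length := by omega
        rw [PySem.List.pyRange_one_cons (by exact_mod_cast hlt), List.foldl_cons,
          List.drop_eq_getElem_cons hlt]
        have hinner := heuristic_inner board (m : Int) (PySem.List.pyGetD board (m : Int) 0)
          (board.length - (m + 1)) (m + 1) (by omega) d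
        push_cast at hinner
        rw [hinner]
        have ih' := ih (m + 1) (by omega)
          (d + confCount (PySem.List.pyGetD board (m : Int) 0) ((m : Int) + 1 - (m : Int)) (board.drop (m + 1)))
        push_cast at ih'
        rw [ih']
        simp only [pairConf]
        have hget : PySem.List.pyGetD board (m : Int) 0 = board[m] := by
          simp [PySem.List.pyGetD_natCast, List.getElem?_eq_getElem hlt]
        have harith : (m : Int) + 1 - (m : Int) = 1 := by ring
        rw [hget, harith]
        ring
  have h0 := outer board.length 0 (by omega) 0
  simpa [heuristic] using h0

lemma slice_set (board : List Int) (i j : Int) (hi : 0 ≤ i) (hlt : i < (board.length : Int)) :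
    PySem.List.slice board none (some i) ++ [j] ++ PySem.List.slice board (some (i + 1)) none
      = PySem.List.pySetD board i j := by
  rw [PySem.List.slice_to board hi, PySem.List.slice_from board (by omega : (0:Int) ≤ i + 1),
    PySem.List.pySetD_of_nonneg board j hi]
  have h1 : (i + 1).toNat = i.toNat + 1 := by omega
  rw [h1]
  have hn : i.toNat < board.length := by omega
  rw [List.set_eq_take_append_cons_drop, if_pos hn, List.append_assoc, List.singleton_append]

lemma pySetD_pySetD (b : List Int) (i j j' : Int) (hi : 0 ≤ i) :
    PySem.List.pySetD (PySem.List.pySetD b i j) i j' = PySem.List.pySetD b i j' := by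
  simp [PySem.List.pySetD_of_nonneg _ _ hi, List.set_set]

lemma pySetD_restore (board : List Int) (i : Int) (hi : 0 ≤ i) (hlt : i < (board.length : Int)) :
    PySem.List.pySetD board i (PySem.List.pyGetD board i 0) = board := by
  have hn : i.toNat < board.length := by omega
  rw [PySem.List.pySetD_of_nonneg _ _ hi, PySem.List.pyGetD_eq_getElem board 0 hi hlt]
  exact List.set_getElem_self hn

lemma cntR_split (v : Int) (A B : List Int) : cntR v (A ++ B) = cntR v A + cntR v B := by
  induction A with
  | nil => simp [cntR]
  | cons q t ih => simp only [List.cons_append, cntR, ih]; ring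

lemma cntD_split (w : Int) (A B : List Int) :
    ∀ s, cntD w s (A ++ B) = cntD w s A + cntD w (s + (A.length : Int)) B := by
  induction A with
  | nil => intro s; simp [cntD]
  | cons q t ih =>
      intro s
      simp only [List.cons_append, cntD, ih (s + 1), List.length_cons]
      push_cast
      ring_nf

lemma cntA_split (w : Int) (A B : List Int) :
    ∀ s, cntA w s (A ++ B) = cntA w s A + cntA w (s + (A.length : Int)) B := by
  induction A with
  | nil => intro s; simp [cntA]
  | cons q t ih =>
      intro s
      simp only [List.cons_append, cntA, ih (s + 1), List.length_cons]
      push_cast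
      ring_nf

lemma cntD_shift (t : List Int) (w : Int) : ∀ s, cntD (w + 1) (s + 1) t = cntD w s t := by
  induction t with
  | nil => intro s; simp [cntD]
  | cons q t ih =>
      intro s
      simp only [cntD, ih (s + 1)]
      congr 1
      split_ifs <;> omega

lemma cntA_shift (t : List Int) (w : Int) : ∀ s, cntA (w - 1) (s + 1) t = cntA w s t := by
  induction t with
  | nil => intro s; simp [cntA]
  | cons q t ih =>
      intro s
      simp only [cntA, ih (s + 1)]
      congr 1
      split_ifs <;> omega

lemma confCount_split (j : Int) (A B : List Int) :
    ∀ d, confCount j d (A ++ B) = confCount j d A + confCount j (d + (A.length : Int)) B := by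
  induction A with
  | nil => intro d; simp [confCount]
  | cons q t ih =>
      intro d
      simp only [List.cons_append, confCount, ih (d + 1), List.length_cons]
      push_cast
      ring_nf

lemma confSplit (t : List Int) (x i : Int) :
    ∀ s, i < s → confCount x (s - i) t = cntR x t + cntD (i + x) s t + cntA (x - i) s t := by
  induction t with
  | nil => intro s _; simp [confCount, cntR, cntD, cntA]
  | cons q t ih =>
      intro s hs
      have h1 : s - i + 1 = (s + 1) - i := by ring
      simp only [confCount, cntR, cntD, cntA, h1, ih (s + 1) (by omega)]
      split_ifs <;> omega

def gmid (pre suf : List Int) (x : Int) : Int :=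
  cntR x pre + cntD ((pre.length : Int) + x) 0 pre + cntA (x - (pre.length : Int)) 0 pre
    + cntR x suf + cntD ((pre.length : Int) + x) ((pre.length : Int) + 1) suf
    + cntA (x - (pre.length : Int)) ((pre.length : Int) + 1) suf

lemma S_mid (suf : List Int) (x y : Int) :
    ∀ pre, pairConf (pre ++ x :: suf) - gmid pre suf x
      = pairConf (pre ++ y :: suf) - gmid pre suf y := by
  intro pre
  induction pre with
  | nil =>
      have hx := confSplit suf x 0 1 (by omega)
      have hy := confSplit suf y 0 1 (by omega)
      simp only [List.nil_append, pairConf, gmid, cntR, cntD, cntA, List.length_nil] at *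
      push_cast at *
      omega
  | cons p t ih =>
      have hsplx := confCount_split p t (x :: suf) 1
      have hsply := confCount_split p t (y :: suf) 1
      simp only [confCount] at hsplx hsply
      simp only [List.cons_append, pairConf, gmid, cntR, cntD, cntA, List.length_cons,
        hsplx, hsply] at *
      push_cast at *
      -- shift lemmas to align the (t.length+1)-indexed counts with the t.length-indexed ones
      have s1 : ∀ w, cntD (w + 1) (0 + 1) t = cntD w 0 t := fun w => cntD_shift t w 0
      have s2 : ∀ w, cntA (w - 1) (0 + 1) t = cntA w 0 t := fun w => cntA_shift t w 0
      have s3 : ∀ w s, cntD (w + 1) (s + 1) suf = cntD w s suf := cntD_shift suf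
      have s4 : ∀ w s, cntA (w - 1) (s + 1) suf = cntA w s suf := cntA_shift suf
      have e1x : cntD ((t.length : Int) + 1 + x) 1 t = cntD ((t.length : Int) + x) 0 t := by
        have := s1 ((t.length : Int) + x); simpa [add_comm, add_assoc, add_left_comm] using this
      have e1y : cntD ((t.length : Int) + 1 + y) 1 t = cntD ((t.length : Int) + y) 0 t := by
        have := s1 ((t.length : Int) + y); simpa [add_comm, add_assoc, add_left_comm] using this
      have e2x : cntA (x - ((t.length : Int) + 1)) 1 t = cntA (x - (t.length : Int)) 0 t := by
        have := s2 (x - (t.length : Int)); rw [← this]; congr 1; ring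
      have e2y : cntA (y - ((t.length : Int) + 1)) 1 t = cntA (y - (t.length : Int)) 0 t := by
        have := s2 (y - (t.length : Int)); rw [← this]; congr 1; ring
      have e3x : cntD ((t.length : Int) + 1 + x) ((t.length : Int) + 1 + 1) suf
          = cntD ((t.length : Int) + x) ((t.length : Int) + 1) suf := by
        have := s3 ((t.length : Int) + x) ((t.length : Int) + 1)
        rw [← this]; congr 1; ring
      have e3y : cntD ((t.length : Int) + 1 + y) ((t.length : Int) + 1 + 1) suf
          = cntD ((t.length : Int) + y) ((t.length : Int) + 1) suf := by
        have := s3 ((t.length : Int) + y) ((t.length : Int) + 1)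
        rw [← this]; congr 1; ring
      have e4x : cntA (x - ((t.length : Int) + 1)) ((t.length : Int) + 1 + 1) suf
          = cntA (x - (t.length : Int)) ((t.length : Int) + 1) suf := by
        have := s4 (x - (t.length : Int)) ((t.length : Int) + 1)
        rw [← this]; congr 1; ring
      have e4y : cntA (y - ((t.length : Int) + 1)) ((t.length : Int) + 1 + 1) suf
          = cntA (y - (t.length : Int)) ((t.length : Int) + 1) suf := by
        have := s4 (y - (t.length : Int)) ((t.length : Int) + 1)
        rw [← this]; congr 1; ring
      rw [e1x, e1y, e2x, e2y, e3x, e3y, e4x, e4y] at *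
      have hL : (0 : Int) < (t.length : Int) + 1 := by positivity
      split_ifs at * <;> omega

lemma delta_eq (board : List Int) (m : Nat) (hm : m < board.length) (j : Int) :
    pairConf board - (cntR board[m] board - 1) - (cntD ((m : Int) + board[m]) 0 board - 1)
      - (cntA (board[m] - (m : Int)) 0 board - 1)
      + (cntR j board + cntD ((m : Int) + j) 0 board + cntA (j - (m : Int)) 0 board
         - (if j = board[m] then 3 else 0))
    = pairConf (board.set m j) := by
  have hb : board.take m ++ board[m] :: board.drop (m + 1) = board := by
    rw [← List.drop_eq_getElem_cons hm, List.take_append_drop]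
  have hset : board.set m j = board.take m ++ j :: board.drop (m + 1) := by
    rw [List.set_eq_take_append_cons_drop, if_pos hm]
  have hlen : ((board.take m).length : Int) = (m : Int) := by
    simp [List.length_take, Nat.min_eq_left (Nat.le_of_lt hm)]
  set pre := board.take m with hpre
  set suf := board.drop (m + 1) with hsuf
  obtain ⟨r0, hr0⟩ : ∃ r0, board[m] = r0 := ⟨_, rfl⟩
  rw [hr0] at hb
  have hmid := S_mid suf j r0 pre
  rw [hset, hr0, ← hb]
  rw [cntR_split, cntD_split, cntA_split, cntR_split, cntD_split, cntA_split]
  simp only [cntR, cntD, cntA, hlen, zero_add]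
  rw [show pairConf (pre ++ j :: suf) = pairConf (pre ++ r0 :: suf)
      - gmid pre suf r0 + gmid pre suf j from by omega]
  simp only [gmid, hlen]
  split_ifs <;> omega

lemma inner_eq (board : List Int) (cost i : Int) (hi : 0 ≤ i) (hlt : i < (board.length : Int)) :
    ∀ (js : List Int) (st : List Int × Option (List Int)),
      (∀ j, PySem.List.pySetD st.1 i j = PySem.List.pySetD board i j) →
      (∀ j, PySem.List.pySetD (js.foldl (fun (st : List Int × Option (List Int)) j =>
          let bd := PySem.List.pySetD st.1 i j
          if heuristic bd < cost then (bd, some bd) else (bd, st.2)) st).1 i j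
        = PySem.List.pySetD board i j) ∧
      (js.foldl (fun (st : List Int × Option (List Int)) j =>
          let bd := PySem.List.pySetD st.1 i j
          if heuristic bd < cost then (bd, some bd) else (bd, st.2)) st).2
        = js.foldl (fun (ans : Option (List Int)) j =>
            if (pairConf board - (cntR (PySem.List.pyGetD board i 0) board - 1)
                - (cntD (i + PySem.List.pyGetD board i 0) 0 board - 1)
                - (cntA (PySem.List.pyGetD board i 0 - i) 0 board - 1))
               + (cntR j board + cntD (i + j) 0 board + cntA (j - i) 0 board
                  - (if j == PySem.List.pyGetD board i 0 then 3 else 0)) < cost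
            then some (PySem.List.slice board none (some i) ++ [j]
                       ++ PySem.List.slice board (some (i + 1)) none)
            else ans) st.2 := by
  intro js
  induction js with
  | nil => intro st hst; exact ⟨hst, rfl⟩
  | cons j t ih =>
      intro st hst
      simp only [List.foldl_cons]
      have hbd : PySem.List.pySetD st.1 i j = PySem.List.pySetD board i j := hst j
      have hnb : PySem.List.slice board none (some i) ++ [j] ++ PySem.List.slice board (some (i + 1)) none
          = PySem.List.pySetD board i j := slice_set board i j hi hlt
      have hm : i.toNat < board.length := by omega
      have hcast : ((i.toNat : Nat) : Int) = i := by omega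
      have hget : PySem.List.pyGetD board i 0 = board[i.toNat] := by
        rw [PySem.List.pyGetD_eq_getElem board 0 hi hlt]
      have hdelta := delta_eq board i.toNat hm j
      rw [hcast] at hdelta
      have hcond : (pairConf board - (cntR (PySem.List.pyGetD board i 0) board - 1)
                - (cntD (i + PySem.List.pyGetD board i 0) 0 board - 1)
                - (cntA (PySem.List.pyGetD board i 0 - i) 0 board - 1))
               + (cntR j board + cntD (i + j) 0 board + cntA (j - i) 0 board
                  - (if j == PySem.List.pyGetD board i 0 then 3 else 0))
          = heuristic (PySem.List.pySetD st.1 i j) := by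
        rw [hbd, heuristic_eq, hget, PySem.List.pySetD_of_nonneg board j hi]
        rw [← hdelta]
        simp only [beq_iff_eq]
      have hst' : ∀ j', PySem.List.pySetD
          (if heuristic (PySem.List.pySetD st.1 i j) < cost
            then (PySem.List.pySetD st.1 i j, some (PySem.List.pySetD st.1 i j))
            else (PySem.List.pySetD st.1 i j, st.2)).1 i j'
          = PySem.List.pySetD board i j' := by
        intro j'
        split_ifs <;> simp only [] <;> rw [hbd, pySetD_pySetD _ _ _ _ hi]
      have := ih _ hst'
      refine ⟨this.1, ?_⟩
      rw [this.2]
      congr 1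
      rw [hcond, hbd, hnb]
      split_ifs <;> simp

lemma outer_eq (board : List Int) (cost : Int) :
    ∀ (is : List Int), (∀ i ∈ is, 0 ≤ i ∧ i < (board.length : Int)) → ∀ ans : Option (List Int),
      (is.foldl (fun (st : List Int × Option (List Int)) i =>
          let temp := PySem.List.pyGetD st.1 i 0
          let st2 := (PySem.List.pyRange 0 (board.length : Int) 1).foldl
            (fun (st : List Int × Option (List Int)) j =>
              let bd := PySem.List.pySetD st.1 i j
              if heuristic bd < cost then (bd, some bd) else (bd, st.2))
            st
          (PySem.List.pySetD st2.1 i temp, st2.2)) (board, ans)).2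
      = is.foldl (fun (ans : Option (List Int)) i =>
          (PySem.List.pyRange 0 (board.length : Int) 1).foldl
            (fun (ans : Option (List Int)) j =>
              if (pairConf board - (cntR (PySem.List.pyGetD board i 0) board - 1)
                  - (cntD (i + PySem.List.pyGetD board i 0) 0 board - 1)
                  - (cntA (PySem.List.pyGetD board i 0 - i) 0 board - 1))
                 + (cntR j board + cntD (i + j) 0 board + cntA (j - i) 0 board
                    - (if j == PySem.List.pyGetD board i 0 then 3 else 0)) < cost
              then some (PySem.List.slice board none (some i) ++ [j]
                         ++ PySem.List.slice board (some (i + 1)) none)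
              else ans) ans) ans := by
  intro is
  induction is with
  | nil => intro _ ans; rfl
  | cons i t ih =>
      intro hmem ans
      obtain ⟨hi, hlt⟩ := hmem i (by simp)
      simp only [List.foldl_cons]
      have hin := inner_eq board cost i hi hlt (PySem.List.pyRange 0 (board.length : Int) 1)
        (board, ans) (fun _ => rfl)
      have hrest : PySem.List.pySetD
          ((PySem.List.pyRange 0 (board.length : Int) 1).foldl
            (fun (st : List Int × Option (List Int)) j =>
              let bd := PySem.List.pySetD st.1 i j
              if heuristic bd < cost then (bd, some bd) else (bd, st.2))
            (board, ans)).1 i (PySem.List.pyGetD board i 0) = board := by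
        rw [hin.1 (PySem.List.pyGetD board i 0), pySetD_restore board i hi hlt]
      rw [hrest, hin.2]
      exact ih (fun i hi => hmem i (by simp [hi])) _

theorem bestneighbour_eq (board : List Int) (cost : Int) :
    bestneighbour board cost = bestneighbour_alt board cost := by
  simp only [bestneighbour, bestneighbour_alt, conflictStats]
  simp only [(bfold_inv board).1, (bfold_inv board).2.1, (bfold_inv board).2.2.1,
    (bfold_inv board).2.2.2]
  exact outer_eq board cost (PySem.List.pyRange 0 (board.length : Int) 1)
    (fun i hi => by
      rw [PySem.List.mem_pyRange_one] at hi
      exact ⟨hi.1, hi.2⟩) none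

-- ===== VERDICT (by name: the statement is the Claim_ definition above) =====
theorem bestneighbour_spec : Claim_equal_bestneighbour := by
  intro board cost _
  unfold Spec_bestneighbour
  exact bestneighbour_eq board cost
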